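-- pv_equiv track=rewrite | github.com/Possible-99/berkley-fundamentals_progamming | hw/hw1/hw1.py | falling
-- ===== SOURCE A (Python) =====
-- def falling(n, k):
--     """Compute the falling factorial of n to depth k.
--
--     >>> falling(6, 3)  # 6 * 5 * 4
--     120
--     >>> falling(4, 3)  # 4 * 3 * 2
--     24
--     >>> falling(4, 1)  # 4
--     4
--     >>> falling(4, 0)
--     1
--     """
--     "*** YOUR CODE HERE ***"
--     product = 1
--     if k > n : k = n
--
--     while(k):
--         product *= n
--         k -= 1
--         n -= 1
--
--     return product
-- ===== SOURCE B (Python) =====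
-- def falling(n, k):
--     k = min(k, n)
--
--     def prod_range(lo, hi):
--         # product of the integers lo..hi inclusive, by balanced splitting
--         if lo > hi:
--             return 1
--         if lo == hi:
--             return lo
--         mid = (lo + hi) // 2
--         return prod_range(lo, mid) * prod_range(mid + 1, hi)
--
--     return prod_range(n - k + 1, n)
-- ===== Notes on version B (the rewrite author's own statement) =====
-- stated objective: faster
-- what changed: Replaces the term-by-term while-loop accumulation with a balanced divide-and-conquer product of the range n-k+1..n (a product tree), which multiplies big integers of balanced sizes; Pre_ restricts to n, k >= 0, outside which A never returns (the while loop decrements a negative counter forever).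
import Mathlib
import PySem

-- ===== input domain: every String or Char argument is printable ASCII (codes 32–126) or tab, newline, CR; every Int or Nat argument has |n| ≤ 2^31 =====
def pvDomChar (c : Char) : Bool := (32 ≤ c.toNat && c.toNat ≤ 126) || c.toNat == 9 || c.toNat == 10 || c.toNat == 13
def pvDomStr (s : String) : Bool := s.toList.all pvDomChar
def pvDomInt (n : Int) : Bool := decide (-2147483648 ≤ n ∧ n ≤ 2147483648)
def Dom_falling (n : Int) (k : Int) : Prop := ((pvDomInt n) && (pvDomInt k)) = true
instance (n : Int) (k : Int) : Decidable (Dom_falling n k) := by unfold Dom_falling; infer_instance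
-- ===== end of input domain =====

-- B replaces A's while-loop accumulation by a balanced divide-and-conquer product of the range n-k+1..n.

-- ===== PORT A =====
-- the while(k) loop; on Pre_ the counter k is ≥ 0, so the fuel k.toNat runs it exactly as Python does
def fallingLoop : Nat → Int → Int → Int
  | 0, _, product => product
  | Nat.succ k', n, product => fallingLoop k' (n - 1) (product * n)

def falling (n : Int) (k : Int) : Int :=
  let k' : Int := if k > n then n else k
  fallingLoop k'.toNat n 1

-- ===== PORT B =====
-- midpoint bounds, needed by prodRange's termination proof
theorem pvMidBounds (lo hi : Int) (h : lo < hi) :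
    lo ≤ PySem.Int.floordiv (lo + hi) 2 ∧ PySem.Int.floordiv (lo + hi) 2 < hi := by
  have h2 : (0 : Int) < 2 := by norm_num
  constructor
  · exact (PySem.Int.floordiv_two_mid_bounds (le_of_lt h)).1
  · rw [PySem.Int.floordiv_eq_ediv_of_pos h2]
    omega

-- product of the integers lo..hi inclusive, by balanced splitting (Source B's prod_range)
def prodRange (lo hi : Int) : Int :=
  if _hgt : lo > hi then 1
  else if _heq : lo = hi then lo
  else
    let mid := PySem.Int.floordiv (lo + hi) 2
    prodRange lo mid * prodRange (mid + 1) hi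
termination_by (hi - lo).toNat
decreasing_by
  · have := pvMidBounds lo hi (by omega)
    omega
  · have := pvMidBounds lo hi (by omega)
    omega

def falling_alt (n : Int) (k : Int) : Int :=
  let k' : Int := min k n
  prodRange (n - k' + 1) n

-- ===== PRECONDITION & SPEC =====
-- Pre_ excludes negative n or k: there A's while loop decrements a negative counter and never terminates.
def Pre_falling (n : Int) (k : Int) : Prop := 0 ≤ n ∧ 0 ≤ k
instance (n : Int) (k : Int) : Decidable (Pre_falling n k) := by unfold Pre_falling; infer_instance
def pvWitness_falling : Int × Int := (6, 3)
def Spec_falling (n : Int) (k : Int) (out : Int) : Prop := out = falling_alt n k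
instance (n : Int) (k : Int) (out : Int) : Decidable (Spec_falling n k out) := by unfold Spec_falling; infer_instance

-- ===== CLAIM (what is proved, stated in full; the proofs are below) =====
def Claim_equal_falling : Prop := ∀ (n : Int) (k : Int), Dom_falling n k → Pre_falling n k → Spec_falling n k (falling n k)

-- ===== LEMMAS AND PROOFS =====

-- reference product of lo..hi inclusive (proof-only)
def intervalProd (lo hi : Int) : Int := ∏ i ∈ Finset.range (hi + 1 - lo).toNat, (lo + (i : Int))

theorem intervalProd_empty (lo hi : Int) (h : hi < lo) : intervalProd lo hi = 1 := by
  unfold intervalProd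
  have : (hi + 1 - lo).toNat = 0 := by omega
  simp [this]  -- (hi+1-lo).toNat = 0

theorem intervalProd_single (lo : Int) : intervalProd lo lo = lo := by
  unfold intervalProd
  simp

theorem intervalProd_split (lo mid hi : Int) (h1 : lo ≤ mid + 1) (h2 : mid ≤ hi) :
    intervalProd lo hi = intervalProd lo mid * intervalProd (mid + 1) hi := by
  unfold intervalProd
  have hsum : (hi + 1 - lo).toNat = (mid + 1 - lo).toNat + (hi - mid).toNat := by omega
  rw [hsum, Finset.prod_range_add]
  congr 1
  · have heq : (hi + 1 - (mid + 1)).toNat = (hi - mid).toNat := by omega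
    rw [heq]
    apply Finset.prod_congr rfl
    intro i _
    omega

theorem intervalProd_top (lo hi : Int) (h : lo ≤ hi) :
    intervalProd lo hi = intervalProd lo (hi - 1) * hi := by
  unfold intervalProd
  have hsucc : (hi + 1 - lo).toNat = (hi - 1 + 1 - lo).toNat + 1 := by omega
  rw [hsucc, Finset.prod_range_succ]
  congr 1
  omega

theorem fallingLoop_mul (j : Nat) (n p : Int) :
    fallingLoop j n p = p * fallingLoop j n 1 := by
  induction j generalizing n p with
  | zero => simp [fallingLoop]
  | succ j ih =>
    rw [fallingLoop, fallingLoop, ih (n - 1) (p * n), ih (n - 1) (1 * n)]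
    ring

theorem prodRange_eq (lo hi : Int) : prodRange lo hi = intervalProd lo hi := by
  induction lo, hi using prodRange.induct with
  | case1 lo hi hgt => rw [prodRange, dif_pos hgt, intervalProd_empty lo hi (by omega)]
  | case2 hi hgt =>
    rw [prodRange, dif_neg hgt, dif_pos rfl, intervalProd_single]
  | case3 lo hi hgt heq mid ih1 ih2 =>
    have hb : lo ≤ mid ∧ mid < hi := pvMidBounds lo hi (by omega)
    rw [prodRange, dif_neg hgt, dif_neg heq]
    show prodRange lo mid * prodRange (mid + 1) hi = intervalProd lo hi
    rw [ih1, ih2, ← intervalProd_split lo mid hi (by omega) (by omega)]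

theorem fallingLoop_eq (j : Nat) (n : Int) :
    fallingLoop j n 1 = intervalProd (n - (j : Int) + 1) n := by
  induction j generalizing n with
  | zero => simp [fallingLoop, intervalProd_empty (n + 1) n (by omega)]
  | succ j ih =>
    rw [fallingLoop, fallingLoop_mul, mul_comm (1 : Int) n, mul_one, ih (n - 1)]
    have h1 : n - 1 - (j : Int) + 1 = n - ((j : Nat).succ : Int) + 1 := by push_cast; ring
    rw [h1]
    have hle : n - ((j : Nat).succ : Int) + 1 ≤ n := by push_cast; omega
    rw [intervalProd_top _ n hle]
    ring

theorem falling_spec : Claim_equal_falling := by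
  intro n k _ hpre
  obtain ⟨hn, hk⟩ := hpre
  unfold Spec_falling
  have hk' : (if k > n then n else k) = min k n := by
    rcases le_or_gt k n with h | h
    · simp [min_eq_left h]; omega
    · simp [h, min_eq_right (le_of_lt h)]
  show fallingLoop (if k > n then n else k).toNat n 1 = prodRange (n - min k n + 1) n
  rw [hk', prodRange_eq, fallingLoop_eq]
  have : ((min k n).toNat : Int) = min k n := Int.toNat_of_nonneg (le_min hk hn)
  rw [this]
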